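-- pv_equiv track=rewrite | github.com/miguelcarcamov/miguelcarcamov.github.io | scripts/sync_ads_publications.py | _citation_histogram
-- ===== SOURCE A (Python) =====
-- def _citation_histogram(citations: list[int]) -> dict[str, int]:
--     bins = {
--         "0": 0,
--         "1-4": 0,
--         "5-9": 0,
--         "10-19": 0,
--         "20-49": 0,
--         "50+": 0,
--     }
--     for value in citations:
--         if value == 0:
--             bins["0"] += 1
--         elif value <= 4:
--             bins["1-4"] += 1
--         elif value <= 9:
--             bins["5-9"] += 1
--         elif value <= 19:
--             bins["10-19"] += 1
--         elif value <= 49: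
--             bins["20-49"] += 1
--         else:
--             bins["50+"] += 1
--     return bins
-- ===== SOURCE B (Python) =====
-- def _citation_histogram(citations: list[int]) -> dict[str, int]:
--     # Staged cumulative counts: count values <= each upper edge in separate
--     # passes, then take adjacent differences to get the per-bin counts.
--     z = sum(1 for v in citations if v == 0)
--     le4 = sum(1 for v in citations if v <= 4)
--     le9 = sum(1 for v in citations if v <= 9)
--     le19 = sum(1 for v in citations if v <= 19)
--     le49 = sum(1 for v in citations if v <= 49)
--     n = len(citations)
--     return {
--         "0": z,
--         "1-4": le4 - z,
--         "5-9": le9 - le4,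
--         "10-19": le19 - le9,
--         "20-49": le49 - le19,
--         "50+": n - le49,
--     }
-- ===== Notes on version B (the rewrite author's own statement) =====
-- stated objective: alternative
-- what changed: Replaces A's single-pass if/elif ladder updating a dict with staged cumulative counting: separate passes count how many values fall at or below each bin edge, and the per-bin counts are obtained as adjacent differences of those cumulative counts.
import Mathlib
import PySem

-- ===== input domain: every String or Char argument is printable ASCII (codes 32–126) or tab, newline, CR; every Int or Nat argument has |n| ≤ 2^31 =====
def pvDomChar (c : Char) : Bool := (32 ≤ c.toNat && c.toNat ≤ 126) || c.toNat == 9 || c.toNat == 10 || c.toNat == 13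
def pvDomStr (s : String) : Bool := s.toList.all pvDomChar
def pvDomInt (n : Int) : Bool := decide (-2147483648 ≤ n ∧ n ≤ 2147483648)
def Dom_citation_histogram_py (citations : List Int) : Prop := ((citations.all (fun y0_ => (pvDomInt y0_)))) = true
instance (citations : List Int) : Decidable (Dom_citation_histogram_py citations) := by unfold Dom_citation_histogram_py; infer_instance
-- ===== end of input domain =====

-- B replaces A's single-pass if/elif dict-update ladder with staged cumulative counting passes
-- (count values <= each edge, then take adjacent differences) — an alternative decomposition.


-- ===== PORT A =====
def citation_histogram_py (citations : List Int) : List (String × Int) :=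
  (citations.foldl
    (fun bins value =>
      if value == 0 then bins.modify "0" 0 (· + 1)
      else if value ≤ 4 then bins.modify "1-4" 0 (· + 1)
      else if value ≤ 9 then bins.modify "5-9" 0 (· + 1)
      else if value ≤ 19 then bins.modify "10-19" 0 (· + 1)
      else if value ≤ 49 then bins.modify "20-49" 0 (· + 1)
      else bins.modify "50+" 0 (· + 1))
    (PySem.Dict.ofList [("0", 0), ("1-4", 0), ("5-9", 0), ("10-19", 0), ("20-49", 0), ("50+", 0)])).items

-- ===== PORT B =====
def citation_histogram_py_alt (citations : List Int) : List (String × Int) :=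
  let z : Int := citations.countP (fun v => v == 0)
  let le4 : Int := citations.countP (fun v => decide (v ≤ 4))
  let le9 : Int := citations.countP (fun v => decide (v ≤ 9))
  let le19 : Int := citations.countP (fun v => decide (v ≤ 19))
  let le49 : Int := citations.countP (fun v => decide (v ≤ 49))
  let n : Int := citations.length
  [("0", z), ("1-4", le4 - z), ("5-9", le9 - le4),
   ("10-19", le19 - le9), ("20-49", le49 - le19), ("50+", n - le49)]

-- ===== PRECONDITION & SPEC =====
def Spec_citation_histogram_py (citations : List Int) (out : List (String × Int)) : Prop := out = citation_histogram_py_alt citations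
instance (citations : List Int) (out : List (String × Int)) : Decidable (Spec_citation_histogram_py citations out) := by unfold Spec_citation_histogram_py; infer_instance

-- ===== CLAIM (what is proved, stated in full; the proofs are below) =====
def Claim_equal_citation_histogram_py : Prop := ∀ (citations : List Int), Dom_citation_histogram_py citations → Spec_citation_histogram_py citations (citation_histogram_py citations)

-- ===== LEMMAS AND PROOFS =====

-- A's fold, started from arbitrary counters, lands on the zip of the labels with the counter
-- plus the count of values in each exact bin.
theorem pv_inv (cs : List Int) (c0 c1 c2 c3 c4 c5 : Int) :
    (cs.foldl
      (fun bins value =>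
        if value == 0 then bins.modify "0" 0 (· + 1)
        else if value ≤ 4 then bins.modify "1-4" 0 (· + 1)
        else if value ≤ 9 then bins.modify "5-9" 0 (· + 1)
        else if value ≤ 19 then bins.modify "10-19" 0 (· + 1)
        else if value ≤ 49 then bins.modify "20-49" 0 (· + 1)
        else bins.modify "50+" 0 (· + 1))
      (PySem.Dict.mk [("0", c0), ("1-4", c1), ("5-9", c2), ("10-19", c3), ("20-49", c4), ("50+", c5)])).items
    = [("0", c0 + (cs.countP (fun v => v == 0) : Int)),
       ("1-4", c1 + (cs.countP (fun v => decide (v ≤ 4) && !(v == 0)) : Int)),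
       ("5-9", c2 + (cs.countP (fun v => decide (v ≤ 9) && !(decide (v ≤ 4))) : Int)),
       ("10-19", c3 + (cs.countP (fun v => decide (v ≤ 19) && !(decide (v ≤ 9))) : Int)),
       ("20-49", c4 + (cs.countP (fun v => decide (v ≤ 49) && !(decide (v ≤ 19))) : Int)),
       ("50+", c5 + (cs.countP (fun v => !(decide (v ≤ 49))) : Int))] := by
  induction cs generalizing c0 c1 c2 c3 c4 c5 with
  | nil => simp
  | cons v t ih =>
    simp only [List.foldl_cons, List.countP_cons]
    by_cases h0 : v = 0
    · rw [show (if (v == 0) = true then _ else _) = _ from if_pos (by simp [h0])]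
      rw [show (PySem.Dict.mk [("0", c0), ("1-4", c1), ("5-9", c2), ("10-19", c3), ("20-49", c4), ("50+", c5)]).modify "0" 0 (· + 1)
            = PySem.Dict.mk [("0", c0 + 1), ("1-4", c1), ("5-9", c2), ("10-19", c3), ("20-49", c4), ("50+", c5)] from by
        simp [PySem.Dict.modify, PySem.Dict.insert, PySem.Dict.getD, PySem.Dict.get?, PySem.Dict.contains]]
      rw [ih]
      subst h0
      simp; omega
    · rw [show (if (v == 0) = true then _ else _) = _ from if_neg (by simp [h0])]
      by_cases h1 : v ≤ 4
      · rw [if_pos h1]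
        rw [show (PySem.Dict.mk [("0", c0), ("1-4", c1), ("5-9", c2), ("10-19", c3), ("20-49", c4), ("50+", c5)]).modify "1-4" 0 (· + 1)
              = PySem.Dict.mk [("0", c0), ("1-4", c1 + 1), ("5-9", c2), ("10-19", c3), ("20-49", c4), ("50+", c5)] from by
          simp [PySem.Dict.modify, PySem.Dict.insert, PySem.Dict.getD, PySem.Dict.get?, PySem.Dict.contains]]
        rw [ih]
        simp [h0, h1, show v ≤ 9 from by omega, show v ≤ 19 from by omega, show v ≤ 49 from by omega]
        omega
      · rw [if_neg h1]
        by_cases h2 : v ≤ 9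
        · rw [if_pos h2]
          rw [show (PySem.Dict.mk [("0", c0), ("1-4", c1), ("5-9", c2), ("10-19", c3), ("20-49", c4), ("50+", c5)]).modify "5-9" 0 (· + 1)
                = PySem.Dict.mk [("0", c0), ("1-4", c1), ("5-9", c2 + 1), ("10-19", c3), ("20-49", c4), ("50+", c5)] from by
            simp [PySem.Dict.modify, PySem.Dict.insert, PySem.Dict.getD, PySem.Dict.get?, PySem.Dict.contains]]
          rw [ih]
          simp [h0, h1, h2, show v ≤ 19 from by omega, show v ≤ 49 from by omega]
          omega
        · rw [if_neg h2]
          by_cases h3 : v ≤ 19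
          · rw [if_pos h3]
            rw [show (PySem.Dict.mk [("0", c0), ("1-4", c1), ("5-9", c2), ("10-19", c3), ("20-49", c4), ("50+", c5)]).modify "10-19" 0 (· + 1)
                  = PySem.Dict.mk [("0", c0), ("1-4", c1), ("5-9", c2), ("10-19", c3 + 1), ("20-49", c4), ("50+", c5)] from by
              simp [PySem.Dict.modify, PySem.Dict.insert, PySem.Dict.getD, PySem.Dict.get?, PySem.Dict.contains]]
            rw [ih]
            simp [h0, h1, h2, h3, show v ≤ 49 from by omega]
            omega
          · rw [if_neg h3]
            by_cases h4 : v ≤ 49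
            · rw [if_pos h4]
              rw [show (PySem.Dict.mk [("0", c0), ("1-4", c1), ("5-9", c2), ("10-19", c3), ("20-49", c4), ("50+", c5)]).modify "20-49" 0 (· + 1)
                    = PySem.Dict.mk [("0", c0), ("1-4", c1), ("5-9", c2), ("10-19", c3), ("20-49", c4 + 1), ("50+", c5)] from by
                simp [PySem.Dict.modify, PySem.Dict.insert, PySem.Dict.getD, PySem.Dict.get?, PySem.Dict.contains]]
              rw [ih]
              simp [h0, h1, h2, h3, h4]
              omega
            · rw [if_neg h4]
              rw [show (PySem.Dict.mk [("0", c0), ("1-4", c1), ("5-9", c2), ("10-19", c3), ("20-49", c4), ("50+", c5)]).modify "50+" 0 (· + 1)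
                    = PySem.Dict.mk [("0", c0), ("1-4", c1), ("5-9", c2), ("10-19", c3), ("20-49", c4), ("50+", c5 + 1)] from by
                simp [PySem.Dict.modify, PySem.Dict.insert, PySem.Dict.getD, PySem.Dict.get?, PySem.Dict.contains]]
              rw [ih]
              simp [h0, h1, h2, h3, h4]
              omega

-- splitting a cumulative count at an inner predicate that implies it
theorem pv_cnt_split (p q : Int → Bool) (h : ∀ v, q v = true → p v = true) (cs : List Int) :
    cs.countP p = cs.countP q + cs.countP (fun v => p v && !q v) := by
  induction cs with
  | nil => simp
  | cons v t ih =>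
    simp only [List.countP_cons, ih]
    cases hq : q v <;> cases hp : p v <;> simp <;> first | omega | exact absurd (h v hq) (by simp [hp])

-- ===== VERDICT (by name: the statement is the Claim_ definition above) =====
theorem citation_histogram_py_spec : Claim_equal_citation_histogram_py := by
  intro citations _
  show citation_histogram_py citations = citation_histogram_py_alt citations
  unfold citation_histogram_py citation_histogram_py_alt
  rw [show PySem.Dict.ofList [("0", (0:Int)), ("1-4", 0), ("5-9", 0), ("10-19", 0), ("20-49", 0), ("50+", 0)]
        = PySem.Dict.mk [("0", 0), ("1-4", 0), ("5-9", 0), ("10-19", 0), ("20-49", 0), ("50+", 0)] from by decide]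
  rw [pv_inv]
  have h14 := pv_cnt_split (fun v => decide (v ≤ 4)) (fun v => v == 0) (by intro v hv; simp at hv; simp [hv]) citations
  have h59 := pv_cnt_split (fun v => decide (v ≤ 9)) (fun v => decide (v ≤ 4)) (by intro v hv; simp at hv ⊢; omega) citations
  have h1019 := pv_cnt_split (fun v => decide (v ≤ 19)) (fun v => decide (v ≤ 9)) (by intro v hv; simp at hv ⊢; omega) citations
  have h2049 := pv_cnt_split (fun v => decide (v ≤ 49)) (fun v => decide (v ≤ 19)) (by intro v hv; simp at hv ⊢; omega) citations
  have h50 := pv_cnt_split (fun _ => true) (fun v => decide (v ≤ 49)) (by intro v _; rfl) citations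
  simp only [List.countP_true] at h50
  simp at h14 h59 h1019 h2049 h50 ⊢
  omega
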